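-- pv_equiv track=rewrite | github.com/PdxCodeGuild/class_raccoon | Code/Brandon/python/lab18_countwords.py | word_pair
-- ===== SOURCE A (Python) =====
-- def word_pair(x):
--     pair_dict = {}
--     pair_list = []
--     for i in range(len(x)-1):
--         pair_words = x[i], x[i+1]
--         pair_list.append(pair_words)
--     for pair in pair_list:
--         if pair not in pair_dict:
--             pair_dict[pair] = 1
--         else:
--             pair_dict[pair] += 1
--
--     words = list(pair_dict.items()) # .items() returns a list of tuples
--
--     new_list = []
--     words.sort(key=lambda tup: tup[1], reverse=True)  # sort largest to smallest, based on count
--     for i in range(min(10, len(words))):  # print the top 10 words, or all of them, whichever is smaller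
--         new_list.append(words[i])
--     return(new_list)
-- ===== SOURCE B (Python) =====
-- def word_pair(x):
--     counts = {}
--     for pair in zip(x, x[1:]):
--         counts[pair] = counts.get(pair, 0) + 1
--     m = max(counts.values(), default=0)
--     buckets = {}
--     for pair, c in counts.items():
--         buckets.setdefault(c, []).append((pair, c))
--     out = []
--     for c in range(m, 0, -1):
--         out += buckets.get(c, [])
--     return out[:10]
-- ===== Notes on version B (the rewrite author's own statement) =====
-- stated objective: alternative
-- what changed: B counts pairs in one pass over zip(x, x[1:]) with a get-based counter (A builds an explicit pair list, then counts with a membership test) and replaces the stable comparison sort by a counting/bucket collection: entries are grouped by count in insertion order and emitted from the highest count down, then sliced to 10.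
import Mathlib
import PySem

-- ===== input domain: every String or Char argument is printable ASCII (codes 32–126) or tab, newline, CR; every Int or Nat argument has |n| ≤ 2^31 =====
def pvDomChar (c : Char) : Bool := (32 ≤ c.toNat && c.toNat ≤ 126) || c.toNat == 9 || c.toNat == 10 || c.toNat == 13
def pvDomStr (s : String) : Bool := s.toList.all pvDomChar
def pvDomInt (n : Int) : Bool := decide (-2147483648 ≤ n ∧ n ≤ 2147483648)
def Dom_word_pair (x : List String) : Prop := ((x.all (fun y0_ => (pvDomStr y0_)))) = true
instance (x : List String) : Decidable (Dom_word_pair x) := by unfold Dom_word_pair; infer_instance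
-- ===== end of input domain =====

-- B replaces A's index-loop pair list + membership-test counting + stable comparison sort by a
-- one-pass zip counter and a counting/bucket collection from the highest count down (alternative algorithm).

-- ===== PORT A =====
def word_pair (x : List String) : List ((String × String) × Int) :=
  let pair_list :=
    (PySem.List.pyRange 0 ((x.length : Int) - 1) 1).foldl
      (fun acc i => acc ++ [(PySem.List.pyGetD x i "", PySem.List.pyGetD x (i + 1) "")]) []
  let pair_dict :=
    pair_list.foldl
      (fun d p => if d.contains p = false then d.insert p 1 else d.insert p (d.getD p 0 + 1))
      PySem.Dict.empty
  let words := pair_dict.items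
  let sortedWords := PySem.List.sorted words (fun t => t.2) true
  (PySem.List.pyRange 0 (min 10 (sortedWords.length : Int)) 1).foldl
    (fun acc i => acc ++ [PySem.List.pyGetD sortedWords i (("", ""), 0)]) []

-- ===== PORT B =====
def word_pair_alt (x : List String) : List ((String × String) × Int) :=
  let counts :=
    (x.zip (PySem.List.slice x (some 1) none)).foldl
      (fun d p => d.insert p (d.getD p 0 + 1)) PySem.Dict.empty
  let m := PySem.List.maxD counts.values (fun v => v) 0
  let buckets :=
    counts.items.foldl
      (fun b e => b.modify e.2 [] (fun v => v ++ [e])) PySem.Dict.empty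
  let out :=
    (PySem.List.pyRange m 0 (-1)).foldl (fun acc c => acc ++ buckets.getD c []) []
  PySem.List.slice out none (some 10)

-- ===== PRECONDITION & SPEC =====
def Spec_word_pair (x : List String) (out : List ((String × String) × Int)) : Prop := out = word_pair_alt x
instance (x : List String) (out : List ((String × String) × Int)) : Decidable (Spec_word_pair x out) := by unfold Spec_word_pair; infer_instance

-- ===== CLAIM (what is proved, stated in full; the proofs are below) =====
def Claim_equal_word_pair : Prop := ∀ (x : List String), Dom_word_pair x → Spec_word_pair x (word_pair x)

-- ===== LEMMAS AND PROOFS =====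

-- the index loop building A's pair list is zip(x, x[1:])
lemma pairList_eq (x : List String) :
    (PySem.List.pyRange 0 ((x.length : Int) - 1) 1).foldl
      (fun acc i => acc ++ [(PySem.List.pyGetD x i "", PySem.List.pyGetD x (i + 1) "")]) []
    = x.zip x.tail := by
  rw [PySem.List.foldl_append_singleton_eq_map]
  simp only [List.nil_append]
  apply List.ext_getElem
  · simp [PySem.List.length_pyRange_one, List.length_zip, List.length_tail]
  · intro k h1 h2
    have hk : k + 1 < x.length := by
      simp [PySem.List.length_pyRange_one] at h1; omega
    simp only [List.getElem_map, PySem.List.getElem_pyRange_one, List.getElem_zip,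
      List.getElem_tail]
    rw [Prod.mk.injEq]
    constructor
    · rw [PySem.List.pyGetD_eq_getElem x "" (by omega) (by omega)]
      congr 1; omega
    · rw [PySem.List.pyGetD_eq_getElem x "" (by omega) (by omega)]
      congr 1; omega

-- A's membership-test counting loop is insert-with-getD counting
lemma aCount_eq (l : List ((String × String))) :
    l.foldl
      (fun d p => if d.contains p = false then d.insert p 1 else d.insert p (d.getD p 0 + 1))
      PySem.Dict.empty
    = PySem.Dict.counter l := by
  rw [← PySem.Dict.foldl_insert_getD_add_one_eq_counter]
  apply PySem.List.foldl_congr_mem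
  intro acc p _
  by_cases h : acc.contains p = true
  · simp [h]
  · simp only [Bool.not_eq_true] at h
    rw [if_pos (by simp [h]), PySem.Dict.getD_of_not_contains acc 0 h]
    norm_num

-- B's bucket dict holds, at index c, exactly the entries of count c, in order
lemma bucket_getD (items : List ((String × String) × Int)) (c : Int) :
    (items.foldl (fun b e => b.modify e.2 [] (fun v => v ++ [e]))
        (PySem.Dict.empty : PySem.Dict Int (List ((String × String) × Int)))).getD c []
      = items.filter (fun e => e.2 == c) := by
  have h1 : (items.foldl (fun b e => b.modify e.2 [] (fun v => v ++ [e]))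
        (PySem.Dict.empty : PySem.Dict Int (List ((String × String) × Int))))
      = (items.map (fun e => (e.2, e))).foldl
          (fun d p => d.modify p.1 [] (fun v => v ++ [p.2])) PySem.Dict.empty := by
    rw [List.foldl_map]
  rw [h1, PySem.Dict.getD_foldl_modify_append]
  simp [List.filter_map, Function.comp_def]

-- A's copy loop over the first min(10, len) indices is take
lemma takeLoop {α : Type} (l : List α) (d : α) (n : Nat) (hn : n ≤ l.length) :
    (PySem.List.pyRange 0 (n : Int) 1).foldl
      (fun acc i => acc ++ [PySem.List.pyGetD l i d]) [] = l.take n := by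
  rw [PySem.List.foldl_append_singleton_eq_map]
  simp only [List.nil_append]
  apply List.ext_getElem
  · simp [PySem.List.length_pyRange_one, hn]
  · intro k h1 h2
    simp only [List.getElem_map, PySem.List.getElem_pyRange_one, List.getElem_take]
    have hk : k < l.length := by
      simp [PySem.List.length_pyRange_one] at h1; omega
    rw [PySem.List.pyGetD_eq_getElem l d (by omega) (by omega)]
    congr 1
    omega

-- insertBy walks past a block it must not be placed before
lemma insertBy_skip {α : Type} (before : α → α → Bool) (e : α) (l1 l2 : List α)
    (h : ∀ y ∈ l1, before e y = false) :
    PySem.List.insertBy before e (l1 ++ l2) = l1 ++ PySem.List.insertBy before e l2 := by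
  induction l1 with
  | nil => simp
  | cons y t ih =>
    have hy : before e y = false := h y (by simp)
    rw [List.cons_append, PySem.List.insertBy, hy]
    simp only [Bool.false_eq_true, if_false, List.cons_append]
    rw [ih (fun z hz => h z (by simp [hz]))]

-- insertBy goes to the front of a block it precedes entirely
lemma insertBy_front {α : Type} (before : α → α → Bool) (e : α) (l : List α)
    (h : ∀ y ∈ l, before e y = true) :
    PySem.List.insertBy before e l = e :: l := by
  cases l with
  | nil => rfl
  | cons y t => simp [PySem.List.insertBy, h y (by simp)]

-- inserting an element whose key lies in the (strictly descending) bucket index list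
-- lands exactly at the end of its own bucket
lemma insert_flatMap_buckets {α : Type} (key : α → Int) (cs : List Int) (items : List α) (e : α)
    (hcs : cs.Pairwise (fun a b => b < a)) (hk : key e ∈ cs) :
    PySem.List.insertBy (fun a b => decide (key b < key a)) e
        (cs.flatMap (fun c => items.filter (fun f => key f == c)))
      = cs.flatMap (fun c => (items ++ [e]).filter (fun f => key f == c)) := by
  induction cs with
  | nil => simp at hk
  | cons c cs' ih =>
    have hcs' := (List.pairwise_cons.mp hcs).2
    have hlt : ∀ b ∈ cs', b < c := (List.pairwise_cons.mp hcs).1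
    simp only [List.flatMap_cons]
    by_cases hc : key e = c
    · -- e lands at the end of bucket c
      have hskip : ∀ y ∈ items.filter (fun f => key f == c), (fun a b => decide (key b < key a)) e y = false := by
        intro y hy
        have := (List.mem_filter.mp hy).2
        simp at this ⊢
        omega
      rw [insertBy_skip _ _ _ _ hskip]
      have hfront : ∀ y ∈ cs'.flatMap (fun c => items.filter (fun f => key f == c)),
          (fun a b => decide (key b < key a)) e y = true := by
        intro y hy
        obtain ⟨c', hc', hy'⟩ := List.mem_flatMap.mp hy
        have h1 := (List.mem_filter.mp hy').2
        have h2 := hlt c' hc'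
        simp at h1 ⊢
        omega
      rw [insertBy_front _ _ _ hfront]
      have hbk : (items ++ [e]).filter (fun f => key f == c) = items.filter (fun f => key f == c) ++ [e] := by
        simp [List.filter_append, hc]
      have hrest : ∀ c' ∈ cs', (items ++ [e]).filter (fun f => key f == c') = items.filter (fun f => key f == c') := by
        intro c' hc'
        have := hlt c' hc'
        simp [List.filter_append]
        omega
      rw [hbk, List.flatMap_congr (fun c' hc' => (hrest c' hc').symm)]
      simp
    · -- key e ≠ c : skip the whole bucket c and recurse
      have hmem : key e ∈ cs' := by
        rcases List.mem_cons.mp hk with h | h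
        · exact absurd h hc
        · exact h
      have hclt : key e < c := hlt _ hmem
      have hskip : ∀ y ∈ items.filter (fun f => key f == c), (fun a b => decide (key b < key a)) e y = false := by
        intro y hy
        have := (List.mem_filter.mp hy).2
        simp at this ⊢
        omega
      rw [insertBy_skip _ _ _ _ hskip, ih hcs' hmem]
      have : (items ++ [e]).filter (fun f => key f == c) = items.filter (fun f => key f == c) := by
        simp [List.filter_append]
        omega
      rw [this]

-- stable reverse sort by an Int key = bucket collection over any strictly descending
-- index list covering all keys
lemma sorted_rev_eq_flatMap {α : Type} (key : α → Int) (cs : List Int)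
    (hcs : cs.Pairwise (fun a b => b < a)) (items : List α)
    (h : ∀ f ∈ items, key f ∈ cs) :
    PySem.List.sorted items key true
      = cs.flatMap (fun c => items.filter (fun f => key f == c)) := by
  rw [PySem.List.sorted_rev_eq_foldl_insertBy]
  induction items using List.reverseRecOn with
  | nil => simp
  | append_singleton l e ih =>
    rw [List.foldl_append]
    simp only [List.foldl_cons, List.foldl_nil]
    rw [ih (fun f hf => h f (by simp [hf]))]
    exact insert_flatMap_buckets key cs l e hcs (h e (by simp))

-- the assembled equivalence
lemma word_pair_eq (x : List String) : word_pair x = word_pair_alt x := by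
  simp only [word_pair, word_pair_alt, PySem.List.slice_from_one]
  rw [pairList_eq, aCount_eq, PySem.Dict.foldl_insert_getD_add_one_eq_counter]
  set D := PySem.Dict.counter (x.zip x.tail) with hD
  set words := D.items with hwords
  set m := PySem.List.maxD D.values (fun v => v) 0 with hm
  -- the sorted list is the bucket concatenation
  have hcs : (PySem.List.pyRange m 0 (-1)).Pairwise (fun a b => b < a) := by
    rw [PySem.List.pyRange_neg_one_eq_reverse, List.pairwise_reverse]
    exact PySem.List.pairwise_lt_pyRange_one _ _
  have hmemw : ∀ f ∈ words, f.2 ∈ PySem.List.pyRange m 0 (-1) := by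
    intro f hf
    rw [PySem.List.mem_pyRange_neg_one]
    constructor
    · rw [hwords, PySem.Dict.items_counter] at hf
      obtain ⟨k, hk, rfl⟩ := List.mem_map.mp hf
      have : k ∈ x.zip x.tail := (PySem.List.mem_dedup _ _).mp hk
      simpa using List.count_pos_iff.mpr this
    · have hv : f.2 ∈ D.values := List.mem_map.mpr ⟨f, hf, rfl⟩
      exact PySem.List.le_maxD_id _ _ _ hv
  have hsorted : PySem.List.sorted words (fun t => t.2) true
      = (PySem.List.pyRange m 0 (-1)).flatMap (fun c => words.filter (fun f => f.2 == c)) :=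
    sorted_rev_eq_flatMap (fun t => t.2) _ hcs words hmemw
  -- B's out is the same flatMap
  have hout : (PySem.List.pyRange m 0 (-1)).foldl
      (fun acc c => acc ++ (words.foldl (fun b e => b.modify e.2 [] (fun v => v ++ [e]))
        PySem.Dict.empty).getD c []) []
      = (PySem.List.pyRange m 0 (-1)).flatMap (fun c => words.filter (fun f => f.2 == c)) := by
    rw [PySem.List.foldl_append_eq_flatMap]
    simp only [List.nil_append]
    exact List.flatMap_congr (fun c _ => bucket_getD words c)
  rw [hout, PySem.List.slice_to _ (by norm_num)]
  -- A's copy loop is take 10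
  have hn : min (10:Int) ((PySem.List.sorted words (fun t => t.2) true).length : Int)
      = ((min 10 (PySem.List.sorted words (fun t => t.2) true).length : Nat) : Int) := by
    push_cast; omega
  rw [hn, takeLoop _ _ _ (by omega), hsorted]
  simp [← List.take_eq_take_min]

-- ===== VERDICT (by name: the statement is the Claim_ definition above) =====
theorem word_pair_spec : Claim_equal_word_pair := by
  intro x _
  exact word_pair_eq x
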